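-- pv_equiv track=rewrite | github.com/lorangriel/feudal-simulator | src/personal_province.py | build_personal_path
-- ===== SOURCE A (Python) =====
-- from typing import Dict, Iterable, List, Optional
--
-- class PersonalProvinceError(ValueError):
--     """Raised when a personal province assignment is invalid."""
--
-- def build_personal_path(
--     owner_level: str, owner_id: Optional[int], lineage: Iterable[int]
-- ) -> List[int]:
--     """Construct a personal province path from a lineage.
--
--     ``lineage`` is expected to contain ancestor node ids from level 0 upward. A
--     subset is returned depending on the ``owner_level``. Cycles are rejected.
--     """
--
--     normalised_level = str(owner_level or "none")
--     if normalised_level == "none" or owner_id is None: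
--         return []
--
--     seen: set[int] = set()
--     path: List[int] = []
--     for idx, ancestor in enumerate(lineage):
--         if ancestor in seen:
--             raise PersonalProvinceError("Cykel upptäckt i provinsvägen")
--         seen.add(ancestor)
--         path.append(ancestor)
--         if str(idx) == normalised_level:
--             break
--     return path
-- ===== SOURCE B (Python) =====
-- from typing import Iterable, List, Optional
--
-- class PersonalProvinceError(ValueError):
--     """Raised when a personal province assignment is invalid."""
--
-- def build_personal_path(
--     owner_level: str, owner_id: Optional[int], lineage: Iterable[int]
-- ) -> List[int]:
--     """Slice-based variant: compute the cut index, slice the prefix, then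
--     reject cycles by sorting and scanning for an adjacent equal pair."""
--     normalised_level = str(owner_level or "none")
--     if normalised_level == "none" or owner_id is None:
--         return []
--
--     items = list(lineage)
--     cut = len(items)
--     for i in range(len(items)):
--         if str(i) == normalised_level:
--             cut = i + 1
--             break
--     path = items[:cut]
--
--     ordered = sorted(path)
--     if any(x == y for x, y in zip(ordered, ordered[1:])):
--         raise PersonalProvinceError("Cykel upptäckt i provinsvägen")
--     return path
-- ===== Notes on version B (the rewrite author's own statement) =====
-- stated objective: alternative
-- what changed: A builds the path in one fused loop carrying a running 'seen' set and raising on membership; B first computes the cut index over range(len), slices the prefix, then detects duplicates by sorting the prefix and scanning for an adjacent equal pair.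
import Mathlib
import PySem

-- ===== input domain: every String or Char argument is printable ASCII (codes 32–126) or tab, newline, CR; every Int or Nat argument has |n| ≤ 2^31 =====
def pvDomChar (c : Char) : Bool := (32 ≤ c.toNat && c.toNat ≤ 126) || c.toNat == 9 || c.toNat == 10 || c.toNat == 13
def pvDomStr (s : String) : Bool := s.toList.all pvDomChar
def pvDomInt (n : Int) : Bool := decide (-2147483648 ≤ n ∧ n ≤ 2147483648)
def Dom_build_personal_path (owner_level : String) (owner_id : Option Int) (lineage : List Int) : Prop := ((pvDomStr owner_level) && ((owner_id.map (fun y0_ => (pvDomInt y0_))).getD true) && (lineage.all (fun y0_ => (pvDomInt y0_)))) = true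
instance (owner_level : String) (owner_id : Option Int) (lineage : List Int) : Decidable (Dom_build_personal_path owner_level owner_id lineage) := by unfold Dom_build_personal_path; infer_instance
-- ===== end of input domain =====

-- B replaces A's fused seen-set loop by a different algorithm: find the cut index, slice the prefix,
-- then detect duplicates by sorting and scanning adjacent pairs (alternative decomposition, same cost).
-- Pre_ excludes inputs where the iterated prefix contains a duplicate: there A (and B) raise PersonalProvinceError.


-- ===== PORT A =====
-- A's single fused loop: membership test against the running 'seen' set, then append, then break test.
-- The 'raise PersonalProvinceError' branch is excluded by Pre_; the port returns the path built so far there.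
def pathLoopA (normalised : String) : List Int → Nat → PySem.Set Int → List Int → List Int
  | [], _, _, path => path
  | a :: rest, idx, seen, path =>
    if PySem.Set.contains seen a then path  -- Python: raise PersonalProvinceError (outside Pre_)
    else
      if PySem.Int.toStr (idx : Int) = normalised then path ++ [a]
      else pathLoopA normalised rest (idx + 1) (PySem.Set.add seen a) (path ++ [a])

def build_personal_path (owner_level : String) (owner_id : Option Int) (lineage : List Int) : List Int :=
  let normalised := if owner_level = "" then "none" else owner_level
  if normalised = "none" ∨ owner_id = none then []
  else pathLoopA normalised lineage 0 PySem.Set.empty []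

-- ===== PORT B =====
-- B's first stage: 'for i in range(len(items)): if str(i) == normalised: cut = i + 1; break', starting from cut = len.
def findCut (normalised : String) (n : Nat) (i : Nat) : Nat :=
  if i < n then
    (if PySem.Int.toStr (i : Int) = normalised then i + 1 else findCut normalised n (i + 1))
  else n
termination_by n - i

def build_personal_path_alt (owner_level : String) (owner_id : Option Int) (lineage : List Int) : List Int :=
  let normalised := if owner_level = "" then "none" else owner_level
  if normalised = "none" ∨ owner_id = none then []
  else
    let cut := findCut normalised lineage.length 0
    let path := lineage.take cut            -- items[:cut], cut ≥ 0 so take is exact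
    let ordered := PySem.List.sorted path (fun x => x) false
    -- any adjacent equal pair in the sorted prefix ⇒ Python raises (outside Pre_); else return path.
    if (ordered.zip ordered.tail).any (fun p => decide (p.1 = p.2)) then path else path

-- ===== PRECONDITION & SPEC =====
-- length (inclusive) of the prefix A iterates over: up to the first idx with str(idx) == normalised_level
def pvCutLen (normalised : String) : Nat → List Int → Nat
  | _, [] => 0
  | idx, _ :: rest => (if PySem.Int.toStr (idx : Int) = normalised then 0 else pvCutLen normalised (idx + 1) rest) + 1

-- Pre_ excludes exactly the inputs on which A raises PersonalProvinceError: a duplicate ancestor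
-- inside the iterated prefix (when the guards pass). B raises there too.
def Pre_build_personal_path (owner_level : String) (owner_id : Option Int) (lineage : List Int) : Prop :=
  (if owner_level = "" then "none" else owner_level) = "none" ∨ owner_id = none ∨
    (lineage.take (pvCutLen (if owner_level = "" then "none" else owner_level) 0 lineage)).Nodup

instance (owner_level : String) (owner_id : Option Int) (lineage : List Int) : Decidable (Pre_build_personal_path owner_level owner_id lineage) := by unfold Pre_build_personal_path; infer_instance

def pvWitness_build_personal_path : String × Option Int × List Int := ("1", some 5, [10, 20, 30])

def Spec_build_personal_path (owner_level : String) (owner_id : Option Int) (lineage : List Int) (out : List Int) : Prop := out = build_personal_path_alt owner_level owner_id lineage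
instance (owner_level : String) (owner_id : Option Int) (lineage : List Int) (out : List Int) : Decidable (Spec_build_personal_path owner_level owner_id lineage out) := by unfold Spec_build_personal_path; infer_instance

-- ===== CLAIM (what is proved, stated in full; the proofs are below) =====
def Claim_equal_build_personal_path : Prop := ∀ (owner_level : String) (owner_id : Option Int) (lineage : List Int), Dom_build_personal_path owner_level owner_id lineage → Pre_build_personal_path owner_level owner_id lineage → Spec_build_personal_path owner_level owner_id lineage (build_personal_path owner_level owner_id lineage)

-- ===== LEMMAS AND PROOFS =====

-- B's index scan computes the same cut length as pvCutLen
lemma findCut_eq (normalised : String) (l : List Int) : ∀ (idx : Nat),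
    findCut normalised (idx + l.length) idx = idx + pvCutLen normalised idx l := by
  induction l with
  | nil => intro idx; unfold findCut; simp [pvCutLen]
  | cons a rest ih =>
    intro idx
    unfold findCut
    have hlt : idx < idx + (a :: rest).length := by simp
    rw [if_pos hlt]
    by_cases hb : PySem.Int.toStr (idx : Int) = normalised
    · simp [pvCutLen, hb]
    · have : idx + (a :: rest).length = (idx + 1) + rest.length := by simp; omega
      rw [if_neg hb, this, ih (idx + 1)]
      simp [pvCutLen, hb]; omega

-- core: under nodup of path ++ iterated prefix, A's fused loop appends exactly the iterated prefix
lemma loop_take (normalised : String) (l : List Int) : ∀ (idx : Nat) (seen : PySem.Set Int) (path : List Int),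
    (∀ x, PySem.Set.contains seen x = true ↔ x ∈ path) →
    (path ++ l.take (pvCutLen normalised idx l)).Nodup →
    pathLoopA normalised l idx seen path = path ++ l.take (pvCutLen normalised idx l) := by
  induction l with
  | nil => intro idx seen path _ _; simp [pathLoopA, pvCutLen]
  | cons a rest ih =>
    intro idx seen path hseen hnd
    have hcut : pvCutLen normalised idx (a :: rest)
        = (if PySem.Int.toStr (idx : Int) = normalised then 0 else pvCutLen normalised (idx + 1) rest) + 1 := rfl
    have hna : a ∉ path := by
      intro ha
      have : ¬ (path ++ (a :: rest).take (pvCutLen normalised idx (a :: rest))).Nodup := by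
        rw [hcut]
        intro h
        have hd := List.disjoint_of_nodup_append h
        exact hd ha (by rw [List.take_succ_cons]; exact List.mem_cons_self ..)
      exact this hnd
    have hsa : PySem.Set.contains seen a = false := by
      cases hc : PySem.Set.contains seen a with
      | false => rfl
      | true => exact absurd ((hseen a).mp hc) hna
    unfold pathLoopA
    rw [hsa]
    simp only [Bool.false_eq_true, if_false]
    by_cases hb : PySem.Int.toStr (idx : Int) = normalised
    · rw [if_pos hb, hcut, if_pos hb, List.take_succ_cons, List.take_zero]
    · rw [if_neg hb]
      have hrw : (a :: rest).take (pvCutLen normalised idx (a :: rest))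
          = a :: rest.take (pvCutLen normalised (idx + 1) rest) := by
        rw [hcut, if_neg hb, List.take_succ_cons]
      rw [hrw] at hnd ⊢
      rw [ih (idx + 1) (PySem.Set.add seen a) (path ++ [a])
        (by
          intro x
          rw [PySem.Set.contains_iff, PySem.Set.mem_add, List.mem_append, List.mem_singleton]
          have hmem : x ∈ seen ↔ x ∈ path := by rw [← PySem.Set.contains_iff, hseen]
          rw [hmem])
        (by rwa [List.append_cons] at hnd)]
      simp

-- ===== VERDICT (by name: the statement is the Claim_ definition above) =====
theorem build_personal_path_spec : Claim_equal_build_personal_path := by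
  intro owner_level owner_id lineage _ hpre
  unfold Spec_build_personal_path build_personal_path build_personal_path_alt
  by_cases hg : (if owner_level = "" then "none" else owner_level) = "none" ∨ owner_id = none
  · simp only [hg, if_pos]
  · simp only [hg, if_neg, not_false_iff]
    have hnd : (lineage.take (pvCutLen (if owner_level = "" then "none" else owner_level) 0 lineage)).Nodup := by
      rcases hpre with h | h | h
      · exact absurd (Or.inl h) hg
      · exact absurd (Or.inr h) hg
      · exact h
    have hfc : findCut (if owner_level = "" then "none" else owner_level) lineage.length 0
        = pvCutLen (if owner_level = "" then "none" else owner_level) 0 lineage := by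
      have := findCut_eq (if owner_level = "" then "none" else owner_level) lineage 0
      simpa using this
    rw [loop_take _ lineage 0 PySem.Set.empty []
      (by intro x; simp [PySem.Set.contains, PySem.Set.empty]) (by simpa using hnd)]
    simp [hfc, ite_self]
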